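-- pv_equiv track=rewrite | github.com/TalFeiny/Dilla | backend/app/services/pwerm_hybrid.py | _determine_stage
-- ===== SOURCE A (Python) =====
-- from typing import Dict, List, Optional, Any, Tuple
--
-- def _determine_stage(funding_rounds: List[Dict]) -> str:
--     """Determine company stage from funding history"""
--     if not funding_rounds:
--         return 'early'
--
--     round_types = [r.get('round', '').lower() for r in funding_rounds]
--
--     if any('d' in r or 'e' in r or 'f' in r for r in round_types):
--         return 'late'
--     elif any('b' in r or 'c' in r for r in round_types):
--         return 'growth'
--     else:
--         return 'early'
-- ===== SOURCE B (Python) =====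
-- from typing import Dict, List, Optional, Any, Tuple
--
-- def _determine_stage(funding_rounds: List[Dict]) -> str:
--     """Determine company stage from funding history"""
--     if not funding_rounds:
--         return 'early'
--     level = 0
--     for r in funding_rounds:
--         s = r.get('round', '').lower()
--         if 'd' in s or 'e' in s or 'f' in s:
--             cur = 2
--         elif 'b' in s or 'c' in s:
--             cur = 1
--         else:
--             cur = 0
--         level = max(level, cur)
--     return 'late' if level == 2 else 'growth' if level == 1 else 'early'
-- ===== Notes on version B (the rewrite author's own statement) =====
-- stated objective: alternative
-- what changed: Replaces A's list-comprehension plus three short-circuit any() scans with a single per-round classify-to-level (0/1/2) pass that tracks a running maximum and maps the final level back to a stage name.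
import Mathlib
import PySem

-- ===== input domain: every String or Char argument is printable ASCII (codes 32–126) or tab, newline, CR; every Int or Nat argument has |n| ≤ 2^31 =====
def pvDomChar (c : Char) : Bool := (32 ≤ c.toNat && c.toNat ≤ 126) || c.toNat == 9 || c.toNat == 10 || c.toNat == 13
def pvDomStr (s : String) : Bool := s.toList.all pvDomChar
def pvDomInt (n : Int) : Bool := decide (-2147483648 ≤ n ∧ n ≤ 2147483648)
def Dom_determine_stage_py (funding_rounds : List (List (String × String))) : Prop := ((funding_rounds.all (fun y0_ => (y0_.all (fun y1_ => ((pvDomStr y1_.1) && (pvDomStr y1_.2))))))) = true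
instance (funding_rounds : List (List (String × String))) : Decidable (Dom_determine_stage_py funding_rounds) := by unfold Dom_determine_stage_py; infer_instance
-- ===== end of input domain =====

-- B replaces A's list-comprehension plus three short-circuit any() scans with one pass that classifies each round to a level 0/1/2 and tracks the running maximum (objective: alternative, same cost).


-- ===== PORT A =====
def pvLowRound (r : List (String × String)) : String :=
  PySem.Str.lower ((PySem.Dict.mk r).getD "round" "")

def determine_stage_py (funding_rounds : List (List (String × String))) : String :=
  if funding_rounds = [] then "early"
  else
    let round_types := funding_rounds.map pvLowRound
    if round_types.any (fun r => PySem.Str.isIn "d" r || PySem.Str.isIn "e" r || PySem.Str.isIn "f" r) then "late"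
    else if round_types.any (fun r => PySem.Str.isIn "b" r || PySem.Str.isIn "c" r) then "growth"
    else "early"

-- ===== PORT B =====
def pvClass (r : List (String × String)) : Nat :=
  let s := PySem.Str.lower ((PySem.Dict.mk r).getD "round" "")
  if PySem.Str.isIn "d" s || PySem.Str.isIn "e" s || PySem.Str.isIn "f" s then 2
  else if PySem.Str.isIn "b" s || PySem.Str.isIn "c" s then 1
  else 0

def determine_stage_py_alt (funding_rounds : List (List (String × String))) : String :=
  if funding_rounds = [] then "early"
  else
    let level := funding_rounds.foldl (fun acc r => max acc (pvClass r)) 0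
    if level = 2 then "late" else if level = 1 then "growth" else "early"

-- ===== PRECONDITION & SPEC =====
def Spec_determine_stage_py (funding_rounds : List (List (String × String))) (out : String) : Prop := out = determine_stage_py_alt funding_rounds
instance (funding_rounds : List (List (String × String))) (out : String) : Decidable (Spec_determine_stage_py funding_rounds out) := by unfold Spec_determine_stage_py; infer_instance

-- ===== CLAIM (what is proved, stated in full; the proofs are below) =====
def Claim_equal_determine_stage_py : Prop := ∀ (funding_rounds : List (List (String × String))), Dom_determine_stage_py funding_rounds → Spec_determine_stage_py funding_rounds (determine_stage_py funding_rounds)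

-- ===== LEMMAS AND PROOFS =====
-- A running maximum of a 2/1/0 classification equals the level read off from two any-scans.
theorem pvFold_max_gen {α : Type} (p2 p1 : α → Bool) (l : List α) (acc : Nat) :
    l.foldl (fun a r => max a (if p2 r then 2 else if p1 r then 1 else 0)) acc =
      max acc (if l.any p2 then 2 else if l.any p1 then 1 else 0) := by
  induction l generalizing acc with
  | nil => simp
  | cons h t ih =>
    by_cases c1 : p2 h = true <;> by_cases c2 : p1 h = true <;>
      by_cases c3 : t.any p2 = true <;> by_cases c4 : t.any p1 = true <;>
      simp [List.foldl_cons, List.any_cons, ih, c1, c2, c3, c4]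

theorem pvClass_eq (r : List (String × String)) :
    pvClass r = (if PySem.Str.isIn "d" (pvLowRound r) || PySem.Str.isIn "e" (pvLowRound r) || PySem.Str.isIn "f" (pvLowRound r) then 2
                 else if PySem.Str.isIn "b" (pvLowRound r) || PySem.Str.isIn "c" (pvLowRound r) then 1 else 0) := rfl

-- ===== VERDICT (by name: the statement is the Claim_ definition above) =====
theorem determine_stage_py_spec : Claim_equal_determine_stage_py := by
  intro fr _
  unfold Spec_determine_stage_py determine_stage_py determine_stage_py_alt
  by_cases h : fr = []
  · simp [h]
  · simp only [h, if_false]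
    have hf : fr.foldl (fun acc r => max acc (pvClass r)) 0 =
        max 0 (if fr.any (fun r => PySem.Str.isIn "d" (pvLowRound r) || PySem.Str.isIn "e" (pvLowRound r) || PySem.Str.isIn "f" (pvLowRound r)) then 2
               else if fr.any (fun r => PySem.Str.isIn "b" (pvLowRound r) || PySem.Str.isIn "c" (pvLowRound r)) then 1 else 0) := by
      simp only [pvClass_eq]
      exact pvFold_max_gen _ _ fr 0
    rw [hf, Nat.zero_max]
    simp only [List.any_map, Function.comp_def]
    split_ifs <;> simp_all
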